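-- pv_equiv track=rewrite | github.com/alexisiddiqui/JAX-ENT | jaxent/dev/beartype/analyze_beartype_warnings.py | group_by_test
-- ===== SOURCE A (Python) =====
-- from collections import defaultdict
-- from typing import Dict, List, Tuple
--
-- def group_by_test(warnings: List[Dict[str, str]]) -> Dict[str, List[Dict[str, str]]]:
--     """Group warnings by test file."""
--     grouped = defaultdict(list)
--     for warning in warnings:
--         test = warning.get('test_context', 'Unknown')
--         # Extract just the test file name
--         if '::' in test:
--             test_file = test.split('::')[0]
--         else:
--             test_file = test
--         grouped[test_file].append(warning)
--     return grouped
-- ===== SOURCE B (Python) =====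
-- def group_by_test(warnings):
--     """Group warnings by test file."""
--     def key(w):
--         return w.get('test_context', 'Unknown').split('::')[0]
--     keys = list(dict.fromkeys(key(w) for w in warnings))
--     return {k: [w for w in warnings if key(w) == k] for k in keys}
-- ===== Notes on version B (the rewrite author's own statement) =====
-- stated objective: alternative
-- what changed: B first computes each warning's test-file key, takes the distinct keys in first-occurrence order via dict.fromkeys, then builds every group with a per-key list-comprehension filter over the whole list, instead of A's single-pass defaultdict accumulation.
import Mathlib
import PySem

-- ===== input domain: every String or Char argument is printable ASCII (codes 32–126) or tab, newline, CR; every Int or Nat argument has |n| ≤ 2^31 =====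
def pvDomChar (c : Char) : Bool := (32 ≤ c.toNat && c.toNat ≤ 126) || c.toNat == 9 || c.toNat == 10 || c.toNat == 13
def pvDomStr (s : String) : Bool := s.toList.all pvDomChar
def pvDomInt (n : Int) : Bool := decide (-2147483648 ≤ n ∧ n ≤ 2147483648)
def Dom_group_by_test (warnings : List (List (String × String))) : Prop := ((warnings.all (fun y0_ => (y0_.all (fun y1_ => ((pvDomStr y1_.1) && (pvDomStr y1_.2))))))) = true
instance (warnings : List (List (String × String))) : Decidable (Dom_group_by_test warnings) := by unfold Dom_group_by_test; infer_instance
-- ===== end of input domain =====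

-- B groups by distinct keys + per-key filter instead of A's single-pass defaultdict accumulation; same result, including order.

-- ===== PORT A =====
def group_by_test (warnings : List (List (String × String))) : List (String × List (List (String × String))) :=
  (warnings.foldl (fun grouped warning =>
      let test := PySem.Dict.getD (PySem.Dict.mk warning) "test_context" "Unknown"
      let test_file :=
        if PySem.Str.isIn "::" test then
          PySem.List.pyGetD ((PySem.Str.split? test "::").getD []) 0 ""
        else test
      grouped.modify test_file [] (· ++ [warning]))
    (PySem.Dict.empty : PySem.Dict String (List (List (String × String))))).items

-- ===== PORT B =====
-- Source B's inner 'key' helper: w.get('test_context', 'Unknown').split('::')[0]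
def pvKeyB (w : List (String × String)) : String :=
  PySem.List.pyGetD
    ((PySem.Str.split? (PySem.Dict.getD (PySem.Dict.mk w) "test_context" "Unknown") "::").getD []) 0 ""

def group_by_test_alt (warnings : List (List (String × String))) : List (String × List (List (String × String))) :=
  (PySem.List.dedup (warnings.map pvKeyB)).map
    (fun k => (k, warnings.filter (fun w => pvKeyB w == k)))

-- ===== PRECONDITION & SPEC =====
def Spec_group_by_test (warnings : List (List (String × String))) (out : List (String × List (List (String × String)))) : Prop := out = group_by_test_alt warnings
instance (warnings : List (List (String × String))) (out : List (String × List (List (String × String)))) : Decidable (Spec_group_by_test warnings out) := by unfold Spec_group_by_test; infer_instance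

-- ===== CLAIM (what is proved, stated in full; the proofs are below) =====
def Claim_equal_group_by_test : Prop := ∀ (warnings : List (List (String × String))), Dom_group_by_test warnings → Spec_group_by_test warnings (group_by_test warnings)

-- ===== LEMMAS AND PROOFS =====

-- splitOn.go on a list with no occurrence of sep just copies the input
lemma splitOn_go_no_occ (sep : List Char) :
    ∀ (fuel : Nat) (l cur : List Char) (acc : List (List Char)), ¬ sep <:+: l →
      PySem.Chars.splitOn.go sep fuel l cur acc = ((cur.reverse ++ l) :: acc).reverse := by
  intro fuel
  induction fuel with
  | zero => intro l cur acc _; rfl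
  | succ fuel ih =>
    intro l cur acc h
    cases l with
    | nil => simp [PySem.Chars.splitOn.go]
    | cons c rest =>
      have hpre : sep.isPrefixOf (c :: rest) = false := by
        by_contra hc
        exact h ((List.isPrefixOf_iff_prefix.mp (by simpa using hc)).isInfix)
      rw [PySem.Chars.splitOn.go]
      simp only [hpre, Bool.false_eq_true, if_false]
      rw [ih rest (c :: cur) acc (fun hi => h (List.infix_cons hi))]
      simp

lemma splitOn_no_occ (s sep : List Char) (h : ¬ sep <:+: s) :
    PySem.Chars.splitOn s sep = [s] := by
  rw [PySem.Chars.splitOn, splitOn_go_no_occ sep _ s [] [] h]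
  simp

-- A's branching key expression equals B's unconditional split('::')[0]
lemma keyA_eq_keyB (t : String) :
    (if PySem.Str.isIn "::" t then PySem.List.pyGetD ((PySem.Str.split? t "::").getD []) 0 "" else t)
      = PySem.List.pyGetD ((PySem.Str.split? t "::").getD []) 0 "" := by
  by_cases h : PySem.Str.isIn "::" t
  · rw [if_pos h]
  · rw [if_neg h]
    have hni : ¬ ([':', ':'] : List Char) <:+: t.toList := by
      intro hi
      exact h ((PySem.Str.isIn_iff_infix "::" t).mpr (by simpa using hi))
    have hs : PySem.Chars.splitOn t.toList [':', ':'] = [t.toList] :=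
      splitOn_no_occ _ _ hni
    simp [PySem.Str.split?, PySem.Chars.split?, hs, PySem.List.pyGetD_zero, String.ofList_toList]

lemma foldl_key_eq (warnings : List (List (String × String)))
    (d : PySem.Dict String (List (List (String × String)))) :
    warnings.foldl (fun grouped warning =>
      let test := PySem.Dict.getD (PySem.Dict.mk warning) "test_context" "Unknown"
      let test_file :=
        if PySem.Str.isIn "::" test then
          PySem.List.pyGetD ((PySem.Str.split? test "::").getD []) 0 ""
        else test
      grouped.modify test_file [] (· ++ [warning])) d
    = warnings.foldl (fun grouped warning => grouped.modify (pvKeyB warning) [] (· ++ [warning])) d := by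
  congr 1
  funext grouped warning
  simp only [keyA_eq_keyB]
  rfl

-- ===== VERDICT (by name: the statement is the Claim_ definition above) =====
theorem group_by_test_spec : Claim_equal_group_by_test := by
  intro warnings _
  unfold Spec_group_by_test group_by_test group_by_test_alt
  rw [foldl_key_eq]
  rw [show (fun (grouped : PySem.Dict String (List (List (String × String)))) warning =>
        grouped.modify (pvKeyB warning) [] (· ++ [warning]))
      = fun grouped warning => ((fun d p => PySem.Dict.modify d p.1 [] (· ++ [p.2])) grouped)
          ((fun w => (pvKeyB w, w)) warning) from rfl]
  rw [← List.foldl_map (f := fun w => (pvKeyB w, w))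
      (g := fun d p => PySem.Dict.modify d p.1 [] (· ++ [p.2]))]
  have hnd := PySem.Dict.nodup_keys_foldl_modify_key (warnings.map (fun w => (pvKeyB w, w)))
      Prod.fst [] (fun _ p => (· ++ [p.2]))
      (PySem.Dict.empty : PySem.Dict String (List (List (String × String))))
      (by simp [PySem.Dict.keys_empty])
  rw [PySem.Dict.items_eq_map_keys _ hnd []]
  rw [PySem.Dict.keys_foldl_modify_key (warnings.map (fun w => (pvKeyB w, w))) Prod.fst []
      (fun _ p => (· ++ [p.2]))]
  simp only [PySem.Dict.keys_empty, PySem.Set.update_nil_left, List.map_map,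
    PySem.List.dedup_eq_ofList]
  apply List.map_congr_left
  intro k _
  rw [PySem.Dict.getD_foldl_modify_append]
  simp [PySem.Dict.getD_empty, List.filter_map, Function.comp_def]
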